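-- pv_equiv track=rewrite | github.com/oziieljuniior/Out | python_project/Atual/Modulos/Vetores5x.py | processa_direcao
-- ===== SOURCE A (Python) =====
-- def processa_direcao(array, limite, inverter=False):
--     direcao, contagem = [], []
--     flag, count = 1, 0
--     for val in array:
--         if (val > limite and not inverter) or (val <= limite and inverter):
--             count = -1
--             flag ^= 1  # Alterna entre 0 e 1
--         count += 1
--         direcao.append(flag)
--         contagem.append(count if not inverter else flag)
--     return direcao, contagem
-- ===== SOURCE B (Python) =====
-- def processa_direcao(array, limite, inverter=False):
--     cross = [(v > limite) != bool(inverter) for v in array]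
--     direcao = []
--     parity = False
--     for c in cross:
--         parity ^= c
--         direcao.append(0 if parity else 1)
--     if inverter:
--         contagem = direcao[:]
--     else:
--         contagem = []
--         last = -1
--         for i, c in enumerate(cross):
--             if c:
--                 last = i
--             contagem.append(i - last)
--     return direcao, contagem
-- ===== Notes on version B (the rewrite author's own statement) =====
-- stated objective: alternative
-- what changed: Replaced A's single stateful loop (toggle flag, reset-and-increment counter) by a crossing boolean list plus a prefix-parity pass for direcao and a last-crossing-index pass for contagem (copied from direcao when inverter).
import Mathlib
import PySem

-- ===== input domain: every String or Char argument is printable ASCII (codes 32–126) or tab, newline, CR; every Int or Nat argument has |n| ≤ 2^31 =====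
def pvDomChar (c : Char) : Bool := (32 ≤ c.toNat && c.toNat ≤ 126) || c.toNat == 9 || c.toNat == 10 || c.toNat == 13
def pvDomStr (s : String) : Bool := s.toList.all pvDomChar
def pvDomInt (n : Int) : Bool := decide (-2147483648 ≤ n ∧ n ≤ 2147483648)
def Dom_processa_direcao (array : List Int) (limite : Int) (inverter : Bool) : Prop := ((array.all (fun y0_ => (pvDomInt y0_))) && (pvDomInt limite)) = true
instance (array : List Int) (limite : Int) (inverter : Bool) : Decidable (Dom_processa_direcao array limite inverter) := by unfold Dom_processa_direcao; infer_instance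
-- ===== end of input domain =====

-- B replaces A's single toggle-flag/reset-counter loop by a crossing list, a prefix-parity pass
-- for direcao and a last-crossing-index pass for contagem (alternative decomposition, same cost).

-- ===== PORT A =====
-- `flag ^= 1` on a flag that is always 0 or 1: exact toggle (Lean's Int has no ^^^).
def pvTogA (flag : Int) : Int := if flag = 1 then 0 else 1

-- the for-loop of A, state (flag, count), building both lists front-first
def pvLoopA (limite : Int) (inverter : Bool) : List Int → Int → Int → List Int × List Int
  | [], _, _ => ([], [])
  | v :: rest, flag, count =>
    let (flag, count) :=
      if (v > limite ∧ ¬ inverter = true) ∨ (v ≤ limite ∧ inverter = true) then (pvTogA flag, -1)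
      else (flag, count)
    let count := count + 1
    let (d, c) := pvLoopA limite inverter rest flag count
    (flag :: d, (if ¬ inverter = true then count else flag) :: c)

def processa_direcao (array : List Int) (limite : Int) (inverter : Bool) : List Int × List Int :=
  pvLoopA limite inverter array 1 0

-- ===== PORT B =====
-- direcao from prefix parity of crossings
def pvLoopD : List Bool → Bool → List Int
  | [], _ => []
  | c :: rest, parity =>
    let parity := parity ^^ c
    (if parity then 0 else 1) :: pvLoopD rest parity

-- contagem (not inverter): distance to the most recent crossing index (initially -1)
def pvLoopC : List Bool → Int → Int → List Int
  | [], _, _ => []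
  | c :: rest, i, last =>
    let last := if c then i else last
    (i - last) :: pvLoopC rest (i + 1) last

def processa_direcao_alt (array : List Int) (limite : Int) (inverter : Bool) : List Int × List Int :=
  let cross := array.map (fun v => (decide (v > limite)) != inverter)
  let direcao := pvLoopD cross false
  let contagem := if inverter then direcao else pvLoopC cross 0 (-1)
  (direcao, contagem)

-- ===== PRECONDITION & SPEC =====
def Spec_processa_direcao (array : List Int) (limite : Int) (inverter : Bool) (out : List Int × List Int) : Prop := out = processa_direcao_alt array limite inverter
instance (array : List Int) (limite : Int) (inverter : Bool) (out : List Int × List Int) : Decidable (Spec_processa_direcao array limite inverter out) := by unfold Spec_processa_direcao; infer_instance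

-- ===== CLAIM (what is proved, stated in full; the proofs are below) =====
def Claim_equal_processa_direcao : Prop := ∀ (array : List Int) (limite : Int) (inverter : Bool), Dom_processa_direcao array limite inverter → Spec_processa_direcao array limite inverter (processa_direcao array limite inverter)

-- ===== LEMMAS AND PROOFS =====

-- the crossing predicate of A coincides with B's boolean form
lemma pvCross_eq (v limite : Int) (inverter : Bool) :
    ((v > limite ∧ ¬ inverter = true) ∨ (v ≤ limite ∧ inverter = true)) ↔
      (((decide (v > limite)) != inverter) = true) := by
  cases inverter <;> by_cases h : v > limite <;> simp [h] <;> try omega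

-- main invariant: A's loop equals B's two passes, given the state correspondence
lemma pvLoopA_eq (limite : Int) (inverter : Bool) :
    ∀ (l : List Int) (parity : Bool) (i last : Int),
      pvLoopA limite inverter l (if parity then 0 else 1) (i - 1 - last) =
        (pvLoopD (l.map (fun v => (decide (v > limite)) != inverter)) parity,
         if inverter then pvLoopD (l.map (fun v => (decide (v > limite)) != inverter)) parity
         else pvLoopC (l.map (fun v => (decide (v > limite)) != inverter)) i last) := by
  intro l
  induction l with
  | nil => intro parity i last; cases inverter <;> simp [pvLoopA, pvLoopD, pvLoopC]
  | cons v rest ih =>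
    intro parity i last
    by_cases hc : ((decide (v > limite)) != inverter) = true
    · have hA := (pvCross_eq v limite inverter).mpr hc
      have htog : pvTogA (if parity = true then 0 else 1)
          = (if (parity ^^ true) = true then 0 else 1) := by
        cases parity <;> simp [pvTogA]
      have h0 : (-1 : Int) + 1 = ((i + 1) - 1 - i) := by ring
      simp only [pvLoopA, List.map_cons, if_pos hA, htog, h0,
        ih (parity ^^ true) (i + 1) i, pvLoopD, pvLoopC, hc]
      cases inverter <;> cases parity <;> simp
    · have hA : ¬ ((v > limite ∧ ¬ inverter = true) ∨ (v ≤ limite ∧ inverter = true)) :=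
        fun h => hc ((pvCross_eq v limite inverter).mp h)
      have hcb : ((decide (v > limite)) != inverter) = false := by
        simpa using hc
      have hcount : (i - 1 - last) + 1 = ((i + 1) - 1 - last) := by ring
      simp only [pvLoopA, List.map_cons, if_neg hA, hcount,
        ih parity (i + 1) last, pvLoopD, pvLoopC, hcb]
      cases inverter <;> simp

-- ===== VERDICT (by name: the statement is the Claim_ definition above) =====
theorem processa_direcao_spec : Claim_equal_processa_direcao := by
  intro array limite inverter _
  show processa_direcao array limite inverter = processa_direcao_alt array limite inverter
  have h := pvLoopA_eq limite inverter array false 0 (-1)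
  simpa [processa_direcao, processa_direcao_alt] using h
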